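-- pv_equiv track=rewrite | github.com/syeej/algorithms | 프로그래머스/1/161989. 덧칠하기/덧칠하기.py | solution
-- ===== SOURCE A (Python) =====
-- def solution(n, m, section):
--     answer = 1
--     startR = section[0]
--     for idx in range(1, len(section)):
--         if startR+m <= section[idx]:
--             answer += 1
--             startR = section[idx]
--
--     return answer
-- ===== SOURCE B (Python) =====
-- def solution(n, m, section):
--     # Divide and conquer: a segment, given the incoming stroke boundary b
--     # (None = no active stroke), yields (strokes used, outgoing boundary);
--     # halves combine by threading the boundary across the split.
--     if not section:
--         return 0
--     def seg(lo, hi, b):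
--         if hi - lo == 1:
--             x = section[lo]
--             if b is None or x >= b:
--                 return 1, x + m
--             return 0, b
--         mid = (lo + hi) // 2
--         c1, b1 = seg(lo, mid, b)
--         c2, b2 = seg(mid, hi, b1)
--         return c1 + c2, b2
--     return seg(0, len(section), None)[0]
-- ===== Notes on version B (the rewrite author's own statement) =====
-- stated objective: alternative
-- what changed: Replaces A's forward scan with mutable state (count, startR) by a divide-and-conquer combine: each half of the section list, given the incoming stroke boundary, returns its stroke count and outgoing boundary, and halves are merged by threading the boundary across the split.
import Mathlib
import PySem

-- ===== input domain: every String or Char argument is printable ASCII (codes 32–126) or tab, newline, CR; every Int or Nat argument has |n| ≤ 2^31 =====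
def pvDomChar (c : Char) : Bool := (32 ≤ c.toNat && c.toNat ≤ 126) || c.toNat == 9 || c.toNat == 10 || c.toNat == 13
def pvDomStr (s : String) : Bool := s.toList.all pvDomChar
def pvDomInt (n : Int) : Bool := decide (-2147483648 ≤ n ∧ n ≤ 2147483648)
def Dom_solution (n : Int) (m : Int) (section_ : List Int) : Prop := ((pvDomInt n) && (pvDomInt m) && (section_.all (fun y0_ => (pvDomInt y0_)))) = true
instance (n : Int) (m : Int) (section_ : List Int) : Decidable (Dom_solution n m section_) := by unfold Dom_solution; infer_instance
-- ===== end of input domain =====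

-- B replaces A's forward scan with mutable state (count, startR) by a divide-and-conquer
-- combine: each half of the section list, given the incoming stroke boundary, returns its
-- stroke count and outgoing boundary, threaded across the split; objective: alternative.

-- ===== PORT A =====
def solution (n : Int) (m : Int) (section_ : List Int) : Int :=
  match PySem.List.pyGet? section_ 0 with
  | none => 0  -- unreachable under Pre_solution: Python raises IndexError on empty section
  | some s0 =>
    ((PySem.List.pyRange 1 (section_.length : Int) 1).foldl
      (fun (st : Int × Int) idx =>
        let v := PySem.List.pyGetD section_ idx 0  -- idx always in range here, so exact
        if st.2 + m ≤ v then (st.1 + 1, v) else st)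
      (1, s0)).1

-- ===== PORT B =====
-- seg(lo, hi, b) of Source B; fuel only makes the recursion total (the top call passes
-- section_.length, enough for every recursive call actually reached).
def segB (section_ : List Int) (m : Int) : Nat → Int → Int → Option Int → Int × Option Int
  | 0, _, _, b => (0, b)  -- fuel exhausted: unreachable from the top call
  | fuel + 1, lo, hi, b =>
    if hi - lo = 1 then
      let x := PySem.List.pyGetD section_ lo 0  -- lo always in range here, so exact
      match b with
      | none => (1, some (x + m))
      | some bb => if bb ≤ x then (1, some (x + m)) else (0, some bb)
    else
      let mid := PySem.Int.floordiv (lo + hi) 2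
      let p1 := segB section_ m fuel lo mid b
      let p2 := segB section_ m fuel mid hi p1.2
      (p1.1 + p2.1, p2.2)

def solution_alt (n : Int) (m : Int) (section_ : List Int) : Int :=
  if section_ = [] then 0
  else (segB section_ m section_.length 0 (section_.length : Int) none).1

-- ===== PRECONDITION & SPEC =====
-- A raises IndexError on the empty list (section[0]); that is the only input A does not return on.
def Pre_solution (n : Int) (m : Int) (section_ : List Int) : Prop := section_ ≠ []
instance (n : Int) (m : Int) (section_ : List Int) : Decidable (Pre_solution n m section_) := by unfold Pre_solution; infer_instance
def pvWitness_solution : Int × Int × List Int := (3, 2, [1, 2, 4])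

def Spec_solution (n : Int) (m : Int) (section_ : List Int) (out : Int) : Prop := out = solution_alt n m section_
instance (n : Int) (m : Int) (section_ : List Int) (out : Int) : Decidable (Spec_solution n m section_ out) := by unfold Spec_solution; infer_instance

-- ===== CLAIM (what is proved, stated in full; the proofs are below) =====
def Claim_equal_solution : Prop := ∀ (n : Int) (m : Int) (section_ : List Int), Dom_solution n m section_ → Pre_solution n m section_ → Spec_solution n m section_ (solution n m section_)

-- ===== LEMMAS AND PROOFS =====

-- the per-element state transformer that segB composes (sequential reading of B)
def stepB (m : Int) (st : Int × Option Int) (x : Int) : Int × Option Int :=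
  match st.2 with
  | none => (st.1 + 1, some (x + m))
  | some bb => if bb ≤ x then (st.1 + 1, some (x + m)) else (st.1, some bb)

theorem foldl_stepB_shift (m : Int) (xs : List Int) : ∀ (p : Int × Option Int),
    xs.foldl (stepB m) p =
      (p.1 + (xs.foldl (stepB m) (0, p.2)).1, (xs.foldl (stepB m) (0, p.2)).2) := by
  induction xs with
  | nil => intro p; simp
  | cons x xs ih =>
    intro p
    simp only [List.foldl_cons]
    have ht : stepB m p x = (p.1 + (stepB m (0, p.2) x).1, (stepB m (0, p.2) x).2) := by
      obtain ⟨c, b⟩ := p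
      cases b <;> simp [stepB] <;> split <;> simp
    rw [ih (stepB m p x), ih (stepB m (0, p.2) x), ht]
    simp [add_assoc]

-- segB computes the sequential fold of stepB over the sublist [lo, hi)
theorem segB_eq_foldl (section_ : List Int) (m : Int) : ∀ (fuel : Nat) (lo hi : Int) (b : Option Int),
    0 ≤ lo → lo < hi → hi ≤ (section_.length : Int) → (hi - lo).toNat ≤ fuel →
    segB section_ m fuel lo hi b =
      ((section_.drop lo.toNat).take (hi - lo).toNat).foldl (stepB m) (0, b) := by
  intro fuel
  induction fuel with
  | zero => intro lo hi b h0 hlt hle hf; omega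
  | succ fuel ih =>
    intro lo hi b h0 hlt hle hf
    by_cases h1 : hi - lo = 1
    · have hlen : lo.toNat < section_.length := by omega
      have htake : (hi - lo).toNat = 1 := by omega
      have hx : PySem.List.pyGetD section_ lo 0 = section_[lo.toNat] := by
        apply PySem.List.pyGetD_eq_getElem <;> omega
      have hd : section_.drop lo.toNat = section_[lo.toNat] :: section_.drop (lo.toNat + 1) :=
        List.drop_eq_getElem_cons hlen
      simp only [segB, if_pos h1, hd, htake, List.take_succ_cons, List.take_zero,
        List.foldl_cons, List.foldl_nil, hx]
      cases b with
      | none => simp [stepB]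
      | some bb => by_cases hbx : bb ≤ section_[lo.toNat] <;> simp [stepB, hbx]
    · have hfd : PySem.Int.floordiv (lo + hi) 2 = (lo + hi) / 2 :=
        PySem.Int.floordiv_eq_ediv_of_pos (by omega)
      simp only [segB, if_neg h1, hfd]
      have hm1 : lo < (lo + hi) / 2 := by omega
      have hm2 : (lo + hi) / 2 < hi := by omega
      rw [ih lo ((lo + hi) / 2) b h0 hm1 (by omega) (by omega),
          ih ((lo + hi) / 2) hi _ (by omega) hm2 hle (by omega)]
      have hsum : (hi - lo).toNat = (((lo + hi) / 2) - lo).toNat + (hi - (lo + hi) / 2).toNat := by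
        omega
      have hdd : (section_.drop lo.toNat).drop (((lo + hi) / 2) - lo).toNat =
          section_.drop ((lo + hi) / 2).toNat := by
        rw [List.drop_drop]; congr 1; omega
      rw [hsum, List.take_add, List.foldl_append, hdd]
      conv_rhs => rw [foldl_stepB_shift]

-- A's forward scan agrees with the sequential fold of stepB when the boundary is s + m
theorem foldA_eq_foldB (m : Int) (xs : List Int) : ∀ (a s : Int),
    (xs.foldl
      (fun (st : Int × Int) v => if st.2 + m ≤ v then (st.1 + 1, v) else st)
      (a, s)).1 = (xs.foldl (stepB m) (a, some (s + m))).1 := by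
  induction xs with
  | nil => intro a s; simp
  | cons x xs ih =>
    intro a s
    by_cases h : s + m ≤ x
    · rw [List.foldl_cons, List.foldl_cons, if_pos h]
      have hb : stepB m (a, some (s + m)) x = (a + 1, some (x + m)) := by simp [stepB, h]
      rw [hb]; exact ih (a + 1) x
    · rw [List.foldl_cons, List.foldl_cons, if_neg h]
      have hb : stepB m (a, some (s + m)) x = (a, some (s + m)) := by simp [stepB, h]
      rw [hb]; exact ih a s

-- ===== VERDICT (by name: the statement is the Claim_ definition above) =====
theorem solution_spec : Claim_equal_solution := by
  intro n m section_ _hd hpre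
  unfold Spec_solution solution solution_alt
  obtain ⟨s0, rest, rfl⟩ : ∃ s0 rest, section_ = s0 :: rest := by
    cases section_ with
    | nil => exact absurd rfl hpre
    | cons a l => exact ⟨a, l, rfl⟩
  have hget : PySem.List.pyGet? (s0 :: rest) 0 = some s0 := by
    simp [PySem.List.pyGet?, PySem.List.pyIdx?]
  rw [hget, if_neg (by simp : ¬ (s0 :: rest = []))]
  have hfold := PySem.List.foldl_pyRange_pyGetD' (xs := s0 :: rest) (a := 1) (d := 0)
    (f := fun (st : Int × Int) v => if st.2 + m ≤ v then (st.1 + 1, v) else st)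
    (init := (1, s0)) (by norm_num)
  simp only [List.length_cons, Nat.cast_add, Nat.cast_one] at hfold ⊢
  rw [hfold]
  have hseg := segB_eq_foldl (s0 :: rest) m (rest.length + 1) 0 ((rest.length : Int) + 1) none
    le_rfl (by omega) (by simp) (by omega)
  rw [hseg]
  have htake : (((s0 :: rest).drop (0 : Int).toNat).take (((rest.length : Int) + 1) - 0).toNat)
      = s0 :: rest := by
    have h1 : (((rest.length : Int) + 1) - 0).toNat = (s0 :: rest).length := by simp
    simp only [Int.toNat_zero, List.drop_zero, h1, List.take_length]
  rw [htake, List.foldl_cons]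
  have hstep0 : stepB m (0, none) s0 = (1, some (s0 + m)) := by simp [stepB]
  rw [hstep0]
  exact foldA_eq_foldB m rest 1 s0
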